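-- pv_equiv track=rewrite | github.com/antonlukisha/md5-cracker | manager/utils/decorators.py | create_task_partitions
-- ===== SOURCE A (Python) =====
-- from typing import List, Dict
--
-- def create_task_partitions(total_combinations: int, task_size: int) -> List[Dict]:
--     """
--     Создание партиций задач для распределения между воркерами
--     """
--     if task_size <= 0:
--         raise ValueError("task_size must be positive")
--
--     partitions = []
--     start = 0
--
--     while start < total_combinations:
--         count = min(task_size, total_combinations - start)
--         partitions.append({
--             'start_index': start,
--             'count': count
--         })
--         start += count
--
--     return partitions
-- ===== SOURCE B (Python) =====
-- from typing import List, Dict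
--
-- def create_task_partitions(total_combinations: int, task_size: int) -> List[Dict]:
--     """
--     Создание партиций задач для распределения между воркерами
--     """
--     if task_size <= 0:
--         raise ValueError("task_size must be positive")
--     full, rem = divmod(max(total_combinations, 0), task_size)
--     partitions = [{'start_index': i * task_size, 'count': task_size} for i in range(full)]
--     if rem > 0:
--         partitions.append({'start_index': full * task_size, 'count': rem})
--     return partitions
-- ===== Notes on version B (the rewrite author's own statement) =====
-- stated objective: alternative
-- what changed: Instead of A's running start-pointer loop computing min(task_size, remaining) each step, B computes full,rem = divmod(max(total,0), task_size) once, emits the full uniform blocks by the closed-form start i*task_size with constant count task_size, and appends a single remainder block of count rem if rem > 0.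
import Mathlib
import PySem

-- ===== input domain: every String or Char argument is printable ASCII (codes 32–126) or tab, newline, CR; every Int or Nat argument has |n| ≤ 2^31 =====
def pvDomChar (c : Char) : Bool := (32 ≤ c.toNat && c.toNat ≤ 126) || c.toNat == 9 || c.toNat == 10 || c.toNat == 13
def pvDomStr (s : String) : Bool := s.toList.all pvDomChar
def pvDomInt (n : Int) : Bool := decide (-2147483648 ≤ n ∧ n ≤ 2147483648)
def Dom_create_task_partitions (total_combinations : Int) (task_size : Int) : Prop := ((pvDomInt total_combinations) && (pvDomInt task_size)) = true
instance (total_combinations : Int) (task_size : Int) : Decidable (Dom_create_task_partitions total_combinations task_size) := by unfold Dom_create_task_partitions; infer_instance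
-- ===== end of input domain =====

-- B replaces A's running-pointer loop (start += min(task_size, remaining)) by one divmod: the
-- number of full blocks and the remainder are computed in closed form, full blocks are emitted
-- with constant count and start i*task_size, and at most one remainder block is appended.

-- ===== PORT A =====
-- while start < total: append {'start_index': start, 'count': min(task_size, total-start)}; start += count
-- (the '0 < ts' conjunct in the guard only makes the recursion total; on Pre_ inputs it always holds)
def create_task_partitions_loop (total ts start : Int)
    (acc : List (List (String × Int))) : List (List (String × Int)) :=
  if _h : start < total ∧ 0 < ts then
    let count := min ts (total - start)
    create_task_partitions_loop total ts (start + count)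
      (acc ++ [[("start_index", start), ("count", count)]])
  else acc
termination_by (total - start).toNat
decreasing_by omega

def create_task_partitions (total_combinations : Int) (task_size : Int) : List (List (String × Int)) :=
  if task_size ≤ 0 then []  -- Python raises ValueError here; excluded by Pre_
  else create_task_partitions_loop total_combinations task_size 0 []

-- ===== PORT B =====
-- full, rem = divmod(max(total, 0), task_size); full uniform blocks, then the remainder block
def create_task_partitions_alt (total_combinations : Int) (task_size : Int) : List (List (String × Int)) :=
  if task_size ≤ 0 then []  -- Python raises ValueError here; excluded by Pre_
  else
    let m := max total_combinations 0
    let full := PySem.Int.floordiv m task_size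
    let rem := PySem.Int.mod m task_size
    let partitions := (List.range full.toNat).map
      (fun i => [("start_index", (i : Int) * task_size), ("count", task_size)])
    if 0 < rem then partitions ++ [[("start_index", full * task_size), ("count", rem)]]
    else partitions

-- ===== PRECONDITION & SPEC =====
-- Pre_ excludes task_size ≤ 0, on which A raises ValueError("task_size must be positive").
def Pre_create_task_partitions (total_combinations : Int) (task_size : Int) : Prop := 0 < task_size
instance (total_combinations : Int) (task_size : Int) : Decidable (Pre_create_task_partitions total_combinations task_size) := by unfold Pre_create_task_partitions; infer_instance
def pvWitness_create_task_partitions : Int × Int := (10, 3)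

def Spec_create_task_partitions (total_combinations : Int) (task_size : Int) (out : List (List (String × Int))) : Prop := out = create_task_partitions_alt total_combinations task_size
instance (total_combinations : Int) (task_size : Int) (out : List (List (String × Int))) : Decidable (Spec_create_task_partitions total_combinations task_size out) := by unfold Spec_create_task_partitions; infer_instance

-- ===== CLAIM (what is proved, stated in full; the proofs are below) =====
def Claim_equal_create_task_partitions : Prop := ∀ (total_combinations : Int) (task_size : Int), Dom_create_task_partitions total_combinations task_size → Pre_create_task_partitions total_combinations task_size → Spec_create_task_partitions total_combinations task_size (create_task_partitions total_combinations task_size)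

-- ===== LEMMAS AND PROOFS =====

-- A's loop, for 0 < ts and total = start + full*ts + rem with 0 ≤ rem < ts, produces exactly
-- 'full' uniform blocks starting at start + i*ts followed by one remainder block if rem > 0.
theorem loop_eq_blocks (ts : Int) (hts : 0 < ts) (total : Int) :
    ∀ (full : Nat) (start rem : Int) (acc : List (List (String × Int))),
      0 ≤ rem → rem < ts → total - start = full * ts + rem →
      create_task_partitions_loop total ts start acc =
        acc ++ (List.range full).map
          (fun i => [("start_index", start + (i : Int) * ts), ("count", ts)]) ++
        (if 0 < rem then [[("start_index", start + full * ts), ("count", rem)]] else []) := by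
  intro full
  induction full with
  | zero =>
    intro start rem acc h0 h1 htot
    simp only [Nat.cast_zero, zero_mul, zero_add] at htot
    rw [create_task_partitions_loop]
    by_cases hr : 0 < rem
    · rw [dif_pos ⟨by omega, hts⟩]
      have hmin : min ts (total - start) = rem := by omega
      rw [create_task_partitions_loop, dif_neg (by omega)]
      simp [htot, if_pos hr]
      omega
    · rw [dif_neg (by omega)]
      simp [if_neg hr]
  | succ n ih =>
    intro start rem acc h0 h1 htot
    have hcast : ((n + 1 : Nat) : Int) = (n : Int) + 1 := by push_cast; ring
    rw [hcast] at htot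
    have hge : ts ≤ total - start := by nlinarith [Int.natCast_nonneg n]
    rw [create_task_partitions_loop, dif_pos ⟨by omega, hts⟩]
    have hmin : min ts (total - start) = ts := by omega
    simp only [hmin]
    rw [ih (start + ts) rem _ h0 h1 (by linarith)]
    rw [List.range_succ_eq_map]
    have hfm : ∀ l : List Nat, List.flatMap (fun a : Nat => [((a : Int))]) l
        = l.map (fun a : Nat => (a : Int)) := by
      intro l; induction l with
      | nil => rfl
      | cons h t iht => simp [List.flatMap_cons, iht]
    simp only [List.bind_eq_flatMap, List.pure_def, hfm, List.map_cons, List.map_map,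
      Function.comp_def, Nat.cast_zero, zero_mul, add_zero, List.append_assoc,
      List.singleton_append, List.cons_append]
    have hmap2 : List.map (fun x : Nat => ([("start_index", start + ts + (x : Int) * ts), ("count", ts)] : List (String × Int))) (List.range n)
        = List.map (fun x : Nat => [("start_index", start + ((x.succ : Nat) : Int) * ts), ("count", ts)]) (List.range n) := by
      apply List.map_congr_left; intro i _
      have h : start + ts + (i : Int) * ts = start + ((i.succ : Nat) : Int) * ts := by
        push_cast; ring
      rw [h]
    rw [hmap2]
    by_cases hr : 0 < rem
    · simp [hr]; push_cast; ring
    · simp [hr]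

-- the shifted full-block map at start = 0 is B's map
theorem blocks_at_zero (ts : Int) (full : Nat) :
    (List.range full).map
      (fun i => ([("start_index", (0:Int) + (i : Int) * ts), ("count", ts)] : List (String × Int))) =
    (List.range full).map
      (fun i => [("start_index", (i : Int) * ts), ("count", ts)]) := by
  apply List.map_congr_left; intro i _; simp

-- ===== VERDICT (by name: the statement is the Claim_ definition above) =====
theorem create_task_partitions_spec : Claim_equal_create_task_partitions := by
  intro total ts _ hpre
  unfold Spec_create_task_partitions create_task_partitions create_task_partitions_alt
  have hn : ¬ ts ≤ 0 := by exact not_le.mpr hpre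
  rw [if_neg hn, if_neg hn]
  simp only []
  set m := max total 0 with hm
  have hm0 : 0 ≤ m := le_max_right _ _
  have hfd : PySem.Int.floordiv m ts = m / ts := PySem.Int.floordiv_eq_ediv_of_pos hpre
  have hmd : PySem.Int.mod m ts = m % ts := PySem.Int.mod_eq_emod_of_pos hpre
  have hq0 : 0 ≤ m / ts := Int.ediv_nonneg hm0 (by omega)
  have hr0 : 0 ≤ m % ts := Int.emod_nonneg m (by omega)
  have hr1 : m % ts < ts := Int.emod_lt_of_pos m hpre
  have hqr : m = m / ts * ts + m % ts := (Int.ediv_add_emod m ts).symm.trans (by ring)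
  have hcast : ((m / ts).toNat : Int) = m / ts := Int.toNat_of_nonneg hq0
  by_cases ht : 0 < total
  · have hmt : m = total := by rw [hm]; exact max_eq_left (by omega)
    have htot : total - 0 = ((m / ts).toNat : Int) * ts + m % ts := by
      rw [hcast]; omega
    rw [loop_eq_blocks ts hpre total (m / ts).toNat 0 (m % ts) [] hr0 hr1 htot]
    rw [hfd, hmd, blocks_at_zero]
    by_cases hr : 0 < m % ts
    · rw [if_pos hr, if_pos hr]
      simp [hcast]
    · rw [if_neg hr, if_neg hr]
      simp
  · have hmz : m = 0 := by rw [hm]; exact max_eq_right (by omega)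
    have hq : m / ts = 0 := by rw [hmz]; simp
    have hr : m % ts = 0 := by rw [hmz]; simp
    rw [create_task_partitions_loop, dif_neg (by omega)]
    rw [hfd, hmd, hq, hr]
    simp
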